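-- pv_equiv track=rewrite | github.com/alexandraback/datacollection | solutions_5634697451274240_1/Python/acesine/B.py | solve
-- ===== SOURCE A (Python) =====
-- def is_ready(pan, target):
--     for p in pan:
--         if p != target:
--             return False
--     return True
--
-- def solve(pan, target):
--     if is_ready(pan, target):
--         return 0
--     nextTarget = pan[-1]
--     if target == pan[-1]:
--         return solve(pan[0:len(pan)-1], nextTarget)
--     else:
--         return solve(pan[0:len(pan)-1], nextTarget)+1
-- ===== SOURCE B (Python) =====
-- def solve(pan, target):
--     count = 0
--     prev = target
--     for p in reversed(pan):
--         if p != prev: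
--             count += 1
--         prev = p
--     return count
-- ===== Notes on version B (the rewrite author's own statement) =====
-- stated objective: faster
-- what changed: Replaced the recursive peel-the-last-pancake-with-a-full-slice algorithm by a single reverse pass that counts inequalities between each element and its successor (the last element compared with target), with no slicing and no recursion.
import Mathlib
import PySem

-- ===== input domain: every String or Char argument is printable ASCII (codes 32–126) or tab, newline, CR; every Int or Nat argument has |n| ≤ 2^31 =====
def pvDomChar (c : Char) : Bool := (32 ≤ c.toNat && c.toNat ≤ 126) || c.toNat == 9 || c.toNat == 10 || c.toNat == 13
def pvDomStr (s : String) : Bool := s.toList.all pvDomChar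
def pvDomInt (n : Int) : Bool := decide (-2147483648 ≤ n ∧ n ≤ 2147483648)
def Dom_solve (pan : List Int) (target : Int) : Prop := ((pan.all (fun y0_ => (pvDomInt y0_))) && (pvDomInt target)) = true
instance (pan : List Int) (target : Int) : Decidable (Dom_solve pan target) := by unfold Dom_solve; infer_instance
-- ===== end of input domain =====

-- B replaces A's recursive peel-last-element-with-a-slice (quadratic) by one reverse
-- pass counting inequalities between neighbours (last element compared with target).

-- ===== PORT A =====
def is_ready (pan : List Int) (target : Int) : Bool :=
  match pan with
  | [] => true
  | p :: rest => if p ≠ target then false else is_ready rest target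

-- termination fact for solve's recursion (cited by name in decreasing_by)
theorem pvSliceLen_lt (pan : List Int) (h : 0 < pan.length) :
    (PySem.List.slice pan (some 0) (some (PySem.List.len pan - 1))).length < pan.length := by
  rw [PySem.List.len_eq, PySem.List.slice_zero_start,
      PySem.List.slice_to _ (by omega : (0:Int) ≤ (pan.length : Int) - 1)]
  simp [List.length_take]
  omega

def solve (pan : List Int) (target : Int) : Int :=
  if is_ready pan target then 0
  else
    match h : PySem.List.pyGet? pan (-1) with
    | none => 0  -- unreachable: is_ready false forces pan ≠ []
    | some nextTarget =>
      if target = nextTarget then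
        solve (PySem.List.slice pan (some 0) (some (PySem.List.len pan - 1))) nextTarget
      else
        solve (PySem.List.slice pan (some 0) (some (PySem.List.len pan - 1))) nextTarget + 1
termination_by pan.length
decreasing_by
  all_goals
    exact pvSliceLen_lt pan (by
      cases pan with
      | nil => simp [PySem.List.pyGet?] at h
      | cons a l => simp)

-- ===== PORT B =====
def solve_alt (pan : List Int) (target : Int) : Int :=
  (pan.reverse.foldl
    (fun (s : Int × Int) p => (if p ≠ s.2 then s.1 + 1 else s.1, p))
    (0, target)).1

-- ===== PRECONDITION & SPEC =====
def Spec_solve (pan : List Int) (target : Int) (out : Int) : Prop := out = solve_alt pan target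
instance (pan : List Int) (target : Int) (out : Int) : Decidable (Spec_solve pan target out) := by unfold Spec_solve; infer_instance

-- ===== CLAIM (what is proved, stated in full; the proofs are below) =====
def Claim_equal_solve : Prop := ∀ (pan : List Int) (target : Int), Dom_solve pan target → Spec_solve pan target (solve pan target)

-- ===== LEMMAS AND PROOFS =====

theorem is_ready_iff (pan : List Int) (t : Int) :
    is_ready pan t = true ↔ ∀ p ∈ pan, p = t := by
  induction pan with
  | nil => simp [is_ready]
  | cons a l ih =>
    simp only [is_ready, List.mem_cons]
    by_cases h : a = t <;> simp [h, ih]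

-- the count component of B's fold is additive in its starting count
theorem foldl_step_shift (l : List Int) (c t : Int) :
    l.foldl (fun (s : Int × Int) p => (if p ≠ s.2 then s.1 + 1 else s.1, p)) (c, t)
      = (c + (l.foldl (fun (s : Int × Int) p => (if p ≠ s.2 then s.1 + 1 else s.1, p)) (0, t)).1,
         (l.foldl (fun (s : Int × Int) p => (if p ≠ s.2 then s.1 + 1 else s.1, p)) (0, t)).2) := by
  induction l generalizing c t with
  | nil => simp
  | cons a l ih =>
    rw [List.foldl_cons, List.foldl_cons]
    show List.foldl _ (if a ≠ t then c + 1 else c, a) l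
      = (c + (List.foldl _ (if a ≠ t then (0:Int) + 1 else 0, a) l).1, _)
    rw [ih (if a ≠ t then c + 1 else c) a, ih (if a ≠ t then (0:Int) + 1 else 0) a]
    refine Prod.ext ?_ rfl
    show (if a ≠ t then c + 1 else c) + _ = c + ((if a ≠ t then (0:Int) + 1 else 0) + _)
    split_ifs <;> omega

theorem foldl_step_all_eq (l : List Int) (t : Int) (h : ∀ p ∈ l, p = t) :
    l.foldl (fun (s : Int × Int) p => (if p ≠ s.2 then s.1 + 1 else s.1, p)) (0, t) = (0, t) := by
  induction l with
  | nil => rfl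
  | cons a l ih =>
    have ha : a = t := h a (by simp)
    subst ha
    rw [List.foldl_cons]
    have hstep : (if a ≠ (((0:Int), a) : Int × Int).2 then (((0:Int), a) : Int × Int).1 + 1
        else (((0:Int), a) : Int × Int).1) = (0 : Int) := by simp
    rw [hstep]
    exact ih (fun p hp => h p (List.mem_cons_of_mem _ hp))

theorem solve_alt_snoc (xs : List Int) (x t : Int) :
    solve_alt (xs ++ [x]) t = (if x = t then 0 else 1) + solve_alt xs x := by
  unfold solve_alt
  rw [List.reverse_append]
  simp only [List.reverse_cons, List.reverse_nil, List.nil_append, List.cons_append,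
    List.foldl_cons]
  show (List.foldl _ (if x ≠ t then (0:Int) + 1 else 0, x) xs.reverse).1 = _
  rw [foldl_step_shift xs.reverse (if x ≠ t then (0:Int) + 1 else 0) x]
  show (if x ≠ t then (0:Int) + 1 else 0) + _ = (if x = t then 0 else 1) + _
  split_ifs <;> omega

theorem solve_eq_alt : ∀ (pan : List Int) (t : Int), solve pan t = solve_alt pan t := by
  intro pan
  induction pan using List.reverseRecOn with
  | nil => intro t; simp [solve, is_ready, solve_alt]
  | append_singleton xs x ih =>
    intro t
    rw [solve]
    by_cases hr : is_ready (xs ++ [x]) t = true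
    · rw [if_pos hr]
      have hall : ∀ p ∈ (xs ++ [x]).reverse, p = t := by
        intro p hp
        exact (is_ready_iff _ _).1 hr p (List.mem_reverse.mp hp)
      unfold solve_alt
      rw [foldl_step_all_eq _ _ hall]
    · rw [if_neg hr]
      rw [PySem.List.pyGet?_neg_one_append_singleton xs x]
      have hslice : PySem.List.slice (xs ++ [x]) (some 0)
          (some (PySem.List.len (xs ++ [x]) - 1)) = xs := by
        rw [PySem.List.len_eq, PySem.List.slice_zero_start]
        have hlen : ((xs ++ [x]).length : Int) - 1 = (xs.length : Int) := by
          simp only [List.length_append, List.length_cons, List.length_nil]; push_cast; omega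
        rw [hlen, PySem.List.slice_to_natCast, List.take_left]
      show (if t = x then solve (PySem.List.slice (xs ++ [x]) (some 0)
              (some (PySem.List.len (xs ++ [x]) - 1))) x
            else solve (PySem.List.slice (xs ++ [x]) (some 0)
              (some (PySem.List.len (xs ++ [x]) - 1))) x + 1) = _
      rw [hslice, ih x, solve_alt_snoc]
      rcases eq_or_ne t x with h | h
      · rw [if_pos h, if_pos h.symm]; omega
      · rw [if_neg h, if_neg (Ne.symm h)]; omega

-- ===== VERDICT (by name: the statement is the Claim_ definition above) =====
theorem solve_spec : Claim_equal_solve := by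
  intro pan target _
  unfold Spec_solve
  exact solve_eq_alt pan target
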